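-- pv_equiv track=rewrite | github.com/AlonurKomilov/analyticbot | core/services/predictive_intelligence/cross_channel/integration_opportunity_service.py | _are_platforms_compatible
-- ===== SOURCE A (Python) =====
-- def _are_platforms_compatible(platform_a: str, platform_b: str) -> bool:
--     """Check if two platforms are compatible for content sync."""
--     compatible_groups = [
--         {"telegram", "discord", "slack"},
--         {"youtube", "tiktok", "instagram"},
--         {"twitter", "linkedin", "facebook"},
--     ]
--
--     for group in compatible_groups:
--         if platform_a in group and platform_b in group:
--             return True
--
--     return False
-- ===== SOURCE B (Python) =====
-- _GROUP_OF = {}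
-- for _i, _group in enumerate((
--     ("telegram", "discord", "slack"),
--     ("youtube", "tiktok", "instagram"),
--     ("twitter", "linkedin", "facebook"),
-- )):
--     for _p in _group:
--         _GROUP_OF[_p] = _i
--
--
-- def _are_platforms_compatible(platform_a: str, platform_b: str) -> bool:
--     """Check if two platforms are compatible for content sync."""
--     ga = _GROUP_OF.get(platform_a)
--     return ga is not None and ga == _GROUP_OF.get(platform_b)
-- ===== Notes on version B (the rewrite author's own statement) =====
-- stated objective: idiomatic
-- what changed: Replaced the per-call scan over the three compatibility sets with a module-level dict mapping each platform to its group index, built once; the function becomes two lookups and a guarded comparison.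
import Mathlib
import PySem

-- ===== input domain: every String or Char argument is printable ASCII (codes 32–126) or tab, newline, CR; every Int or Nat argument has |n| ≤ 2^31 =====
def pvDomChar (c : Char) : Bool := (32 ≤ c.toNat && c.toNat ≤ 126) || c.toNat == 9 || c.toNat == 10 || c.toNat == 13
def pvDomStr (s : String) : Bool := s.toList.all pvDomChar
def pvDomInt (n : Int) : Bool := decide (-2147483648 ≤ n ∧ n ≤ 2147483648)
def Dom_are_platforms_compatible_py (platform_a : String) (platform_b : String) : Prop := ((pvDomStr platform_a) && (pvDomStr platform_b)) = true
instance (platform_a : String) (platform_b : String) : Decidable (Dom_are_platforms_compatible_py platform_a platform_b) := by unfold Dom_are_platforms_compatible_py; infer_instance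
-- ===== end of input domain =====

-- B replaces A's scan over the three compatibility groups by a precomputed
-- platform → group-index table built once, then a single lookup-and-compare (idiomatic; same cost at this size).

-- ===== PORT A =====
-- the literal `compatible_groups` list of A
def pvGroupsA : List (PySem.Set String) :=
  [PySem.Set.ofList ["telegram", "discord", "slack"],
   PySem.Set.ofList ["youtube", "tiktok", "instagram"],
   PySem.Set.ofList ["twitter", "linkedin", "facebook"]]

-- A's `for group in compatible_groups: if a in group and b in group: return True` loop
def pvLoopA : List (PySem.Set String) → String → String → Bool
  | [], _, _ => false
  | g :: rest, a, b =>
      if PySem.Set.contains g a && PySem.Set.contains g b then true else pvLoopA rest a b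

def are_platforms_compatible_py (platform_a : String) (platform_b : String) : Bool :=
  pvLoopA pvGroupsA platform_a platform_b

-- ===== PORT B =====
-- B's module-level table: for i, group in enumerate(...): for p in group: _GROUP_OF[p] = i
def pvGroupOf : PySem.Dict String Int :=
  (PySem.List.enumerate
      [["telegram", "discord", "slack"],
       ["youtube", "tiktok", "instagram"],
       ["twitter", "linkedin", "facebook"]]).foldl
    (fun d ig => ig.2.foldl (fun d p => d.insert p ig.1) d) PySem.Dict.empty

-- ga = _GROUP_OF.get(a); return ga is not None and ga == _GROUP_OF.get(b)
def are_platforms_compatible_py_alt (platform_a : String) (platform_b : String) : Bool :=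
  let ga := pvGroupOf.get? platform_a
  ga.isSome && (ga == pvGroupOf.get? platform_b)

-- ===== PRECONDITION & SPEC =====
def Spec_are_platforms_compatible_py (platform_a : String) (platform_b : String) (out : Bool) : Prop := out = are_platforms_compatible_py_alt platform_a platform_b
instance (platform_a : String) (platform_b : String) (out : Bool) : Decidable (Spec_are_platforms_compatible_py platform_a platform_b out) := by unfold Spec_are_platforms_compatible_py; infer_instance

-- ===== CLAIM (what is proved, stated in full; the proofs are below) =====
def Claim_equal_are_platforms_compatible_py : Prop := ∀ (platform_a : String) (platform_b : String), Dom_are_platforms_compatible_py platform_a platform_b → Spec_are_platforms_compatible_py platform_a platform_b (are_platforms_compatible_py platform_a platform_b)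

-- ===== LEMMAS AND PROOFS =====
-- the nine platform names, in the order A's groups (and B's table) list them
def pvNames : List String :=
  ["telegram", "discord", "slack", "youtube", "tiktok", "instagram", "twitter", "linkedin", "facebook"]

-- B's table evaluates to this literal dict
theorem pvGroupOf_nf : pvGroupOf = PySem.Dict.mk
    [("telegram", 0), ("discord", 0), ("slack", 0), ("youtube", 1), ("tiktok", 1),
     ("instagram", 1), ("twitter", 2), ("linkedin", 2), ("facebook", 2)] := by decide

-- A's group sets evaluate to these literal lists
theorem pvGroupsA_nf : pvGroupsA =
    [["telegram", "discord", "slack"], ["youtube", "tiktok", "instagram"],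
     ["twitter", "linkedin", "facebook"]] := by decide

-- if the SECOND argument is no known platform, both sides are false (for every first argument)
theorem pv_b_out (a b : String) (hb : b ∉ pvNames) :
    are_platforms_compatible_py a b = are_platforms_compatible_py_alt a b := by
  simp only [pvNames, List.mem_cons, List.not_mem_nil, or_false, not_or] at hb
  obtain ⟨h0, h1, h2, h3, h4, h5, h6, h7, h8⟩ := hb
  simp only [are_platforms_compatible_py, are_platforms_compatible_py_alt,
    pvGroupsA_nf, pvGroupOf_nf, pvLoopA, PySem.Set.contains,
    List.contains_cons, List.contains_nil, PySem.Dict.get?_mk_cons, beq_iff_eq]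
  simp [h0, h1, h2, h3, h4, h5, h6, h7, h8,
    Ne.symm h0, Ne.symm h1, Ne.symm h2, Ne.symm h3, Ne.symm h4, Ne.symm h5,
    Ne.symm h6, Ne.symm h7, Ne.symm h8, PySem.Dict.get?]

-- if the FIRST argument is no known platform, both sides are false (for every second argument)
theorem pv_a_out (a b : String) (ha : a ∉ pvNames) :
    are_platforms_compatible_py a b = are_platforms_compatible_py_alt a b := by
  simp only [pvNames, List.mem_cons, List.not_mem_nil, or_false, not_or] at ha
  obtain ⟨h0, h1, h2, h3, h4, h5, h6, h7, h8⟩ := ha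
  simp only [are_platforms_compatible_py, are_platforms_compatible_py_alt,
    pvGroupsA_nf, pvGroupOf_nf, pvLoopA, PySem.Set.contains,
    List.contains_cons, List.contains_nil, PySem.Dict.get?_mk_cons, beq_iff_eq]
  simp [h0, h1, h2, h3, h4, h5, h6, h7, h8,
    Ne.symm h0, Ne.symm h1, Ne.symm h2, Ne.symm h3, Ne.symm h4, Ne.symm h5,
    Ne.symm h6, Ne.symm h7, Ne.symm h8, PySem.Dict.get?]

theorem pv_main (a b : String) :
    are_platforms_compatible_py a b = are_platforms_compatible_py_alt a b := by
  by_cases ha : a ∈ pvNames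
  · by_cases hb : b ∈ pvNames
    · simp only [pvNames, List.mem_cons, List.not_mem_nil, or_false] at ha hb
      rcases ha with rfl | rfl | rfl | rfl | rfl | rfl | rfl | rfl | rfl <;>
        rcases hb with rfl | rfl | rfl | rfl | rfl | rfl | rfl | rfl | rfl <;> decide
    · exact pv_b_out a b hb
  · exact pv_a_out a b ha

-- ===== VERDICT (by name: the statement is the Claim_ definition above) =====
theorem are_platforms_compatible_py_spec : Claim_equal_are_platforms_compatible_py := by
  intro a b _
  unfold Spec_are_platforms_compatible_py
  exact pv_main a b
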